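-- pv_equiv track=rewrite | github.com/firatkizilirmakk/Anova-Linear-Regression-Toolbox | functions.py | ANOVA_all_equal_group_sizes
-- ===== SOURCE A (Python) =====
-- def ANOVA_all_equal_group_sizes(groups: list) -> bool:
--     """
--         Checks whether all the group sizes are equal
--     """
--     assert len(groups) > 0, "Empty list"
--
--     equal_sizes = True
--     group_zero_size = len(groups[0])
--     for group in groups[1:]:
--         if len(group) != group_zero_size:
--             equal_sizes = False
--             break
--     return equal_sizes
-- ===== SOURCE B (Python) =====
-- def ANOVA_all_equal_group_sizes(groups: list) -> bool:
--     """
--         Checks whether all the group sizes are equal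
--     """
--     assert len(groups) > 0, "Empty list"
--
--     sizes = {len(g) for g in groups}
--     return len(sizes) <= 1
-- ===== Notes on version B (the rewrite author's own statement) =====
-- stated objective: idiomatic
-- what changed: Replaced the first-element-pivot compare loop with early break by building the set of all group lengths and checking its cardinality is at most 1.
import Mathlib
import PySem

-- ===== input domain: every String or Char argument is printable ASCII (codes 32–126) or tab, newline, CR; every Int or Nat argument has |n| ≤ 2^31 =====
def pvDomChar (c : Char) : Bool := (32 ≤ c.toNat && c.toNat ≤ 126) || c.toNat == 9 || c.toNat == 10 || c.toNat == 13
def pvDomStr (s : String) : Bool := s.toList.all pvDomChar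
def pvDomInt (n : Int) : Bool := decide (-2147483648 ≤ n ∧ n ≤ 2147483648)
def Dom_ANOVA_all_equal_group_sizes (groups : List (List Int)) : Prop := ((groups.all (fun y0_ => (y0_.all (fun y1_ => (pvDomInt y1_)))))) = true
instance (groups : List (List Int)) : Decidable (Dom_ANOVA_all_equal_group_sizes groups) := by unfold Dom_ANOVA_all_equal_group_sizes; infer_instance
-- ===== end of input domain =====

-- B idiomatically builds the set of all group lengths and checks its cardinality,
-- instead of A's early-break compare loop against the first group's length.

-- ===== PORT A =====
-- the 'for group in groups[1:]' loop with its early break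
def ANOVA_loopA : List (List Int) → Int → Bool
  | [], _ => true
  | g :: rest, sz => if (g.length : Int) ≠ sz then false else ANOVA_loopA rest sz

def ANOVA_all_equal_group_sizes (groups : List (List Int)) : Bool :=
  let group_zero_size : Int := ((groups.headD []).length : Int)
  ANOVA_loopA (groups.drop 1) group_zero_size

-- ===== PORT B =====
def ANOVA_all_equal_group_sizes_alt (groups : List (List Int)) : Bool :=
  let sizes : PySem.Set Int := PySem.Set.ofList (groups.map (fun g => (g.length : Int)))
  decide (PySem.Set.len sizes ≤ 1)

-- ===== PRECONDITION & SPEC =====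
-- A raises AssertionError on the empty list (so does B); Pre_ excludes exactly that input.
def Pre_ANOVA_all_equal_group_sizes (groups : List (List Int)) : Prop := groups ≠ []
instance (groups : List (List Int)) : Decidable (Pre_ANOVA_all_equal_group_sizes groups) := by unfold Pre_ANOVA_all_equal_group_sizes; infer_instance
def pvWitness_ANOVA_all_equal_group_sizes : List (List Int) := [[1, 2], [3, 4]]

def Spec_ANOVA_all_equal_group_sizes (groups : List (List Int)) (out : Bool) : Prop := out = ANOVA_all_equal_group_sizes_alt groups
instance (groups : List (List Int)) (out : Bool) : Decidable (Spec_ANOVA_all_equal_group_sizes groups out) := by unfold Spec_ANOVA_all_equal_group_sizes; infer_instance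

-- ===== CLAIM (what is proved, stated in full; the proofs are below) =====
def Claim_equal_ANOVA_all_equal_group_sizes : Prop := ∀ (groups : List (List Int)), Dom_ANOVA_all_equal_group_sizes groups → Pre_ANOVA_all_equal_group_sizes groups → Spec_ANOVA_all_equal_group_sizes groups (ANOVA_all_equal_group_sizes groups)

-- ===== LEMMAS AND PROOFS =====

-- A's early-break loop decides "every remaining group has length sz"
theorem ANOVA_loopA_eq (rest : List (List Int)) (sz : Int) :
    ANOVA_loopA rest sz = decide (∀ g ∈ rest, (g.length : Int) = sz) := by
  induction rest with
  | nil => simp [ANOVA_loopA]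
  | cons g rest ih =>
      by_cases h : (g.length : Int) = sz <;> simp [ANOVA_loopA, h, ih]

-- a list of length ≤ 1 has pairwise-equal members
theorem eq_of_len_le_one {α : Type} {l : List α} (h : l.length ≤ 1)
    {x y : α} (hx : x ∈ l) (hy : y ∈ l) : x = y := by
  match l, h with
  | [], _ => cases hx
  | [a], _ =>
      simp only [List.mem_singleton] at hx hy
      rw [hx, hy]

-- if every element of xs equals a, folding Set.add over xs from [a] stays [a]
theorem foldl_add_const (a : Int) (xs : List Int) (h : ∀ x ∈ xs, x = a) :
    xs.foldl PySem.Set.add [a] = [a] := by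
  induction xs with
  | nil => rfl
  | cons x xs ih =>
      have hx : x = a := h x (by simp)
      rw [List.foldl_cons, hx]
      have ha : PySem.Set.add [a] a = [a] := by simp [PySem.Set.add]
      rw [ha]
      exact ih (fun y hy => h y (by simp [hy]))

theorem set_len_le_one_iff (a : Int) (xs : List Int) :
    (PySem.Set.len (PySem.Set.ofList (a :: xs)) ≤ 1) ↔ ∀ x ∈ xs, x = a := by
  constructor
  · intro h x hx
    have ha : a ∈ PySem.Set.ofList (a :: xs) := by
      rw [PySem.Set.mem_ofList]; simp
    have hxm : x ∈ PySem.Set.ofList (a :: xs) := by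
      rw [PySem.Set.mem_ofList]; simp [hx]
    have hlen : (PySem.Set.ofList (a :: xs)).length ≤ 1 := by
      simpa [PySem.Set.len] using h
    exact (eq_of_len_le_one hlen hxm ha)
  · intro h
    have : PySem.Set.ofList (a :: xs) = [a] := by
      rw [PySem.Set.ofList_eq_foldl]
      simp only [List.foldl_cons]
      have : PySem.Set.add [] a = [a] := by simp [PySem.Set.add, PySem.Set.contains]
      rw [this]
      exact foldl_add_const a xs h
    simp [PySem.Set.len, this]

-- ===== VERDICT (by name: the statement is the Claim_ definition above) =====
theorem ANOVA_all_equal_group_sizes_spec : Claim_equal_ANOVA_all_equal_group_sizes := by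
  intro groups _ hpre
  unfold Spec_ANOVA_all_equal_group_sizes
  match groups, hpre with
  | g0 :: rest, _ =>
      unfold ANOVA_all_equal_group_sizes ANOVA_all_equal_group_sizes_alt
      simp only [List.headD, List.drop_one, List.tail_cons, List.map_cons]
      rw [ANOVA_loopA_eq, decide_eq_decide]
      have hiff := set_len_le_one_iff ((g0.length : Int)) (rest.map (fun g => (g.length : Int)))
      constructor
      · intro h
        refine hiff.mpr (fun x hx => ?_)
        obtain ⟨g, hg, rfl⟩ := List.mem_map.mp hx
        exact h g hg
      · intro h g hg
        exact hiff.mp h ((g.length : Int)) (List.mem_map_of_mem hg)
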